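-- pv_equiv track=rewrite | github.com/danielWatson3141/coderID | 2984486(small)/FatAlex/5766201229705216/0/extracted/b.py | find_kill_cost
-- ===== SOURCE A (Python) =====
-- def find_kill_cost(par, node_links, K):
--     if par in K:
--         return K[par]
--     n,p=par
--     cost=1
--     for l in node_links[n]:
--         if l!=p:
--             cost=cost+find_kill_cost((l,n),node_links,K)
--     K[par]=cost
--     return cost
-- ===== SOURCE B (Python) =====
-- def find_kill_cost(par, node_links, K):
--     # Iterative defunctionalized version of the memoized subtree-cost recursion:
--     # an explicit stack of ("call"/"loop") frames and a return register replace
--     # the recursion; K receives exactly the same memo entries, in the same order.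
--     stack = [("call", par[0], par[1])]
--     ret = 0
--     while stack:
--         f = stack.pop()
--         if f[0] == "call":
--             _, n, p = f
--             if (n, p) in K:
--                 ret = K[(n, p)]
--             else:
--                 stack.append(("loop", n, p, node_links[n], 1))
--                 ret = 0
--         else:
--             _, n, p, ls, acc = f
--             acc += ret
--             if not ls:
--                 K[(n, p)] = acc
--                 ret = acc
--             else:
--                 stack.append(("loop", n, p, ls[1:], acc))
--                 if ls[0] != p:
--                     stack.append(("call", ls[0], n))
--                 ret = 0
--     return K[par]
-- ===== Notes on version B (the rewrite author's own statement) =====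
-- stated objective: alternative
-- what changed: A's memoized recursion is replaced by an iterative defunctionalized machine: an explicit stack of call/loop frames and a return register, processed in a single while loop, with identical memo-table updates; Pre_ is now exact (it holds precisely when A's traversal terminates without raising).
import Mathlib
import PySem

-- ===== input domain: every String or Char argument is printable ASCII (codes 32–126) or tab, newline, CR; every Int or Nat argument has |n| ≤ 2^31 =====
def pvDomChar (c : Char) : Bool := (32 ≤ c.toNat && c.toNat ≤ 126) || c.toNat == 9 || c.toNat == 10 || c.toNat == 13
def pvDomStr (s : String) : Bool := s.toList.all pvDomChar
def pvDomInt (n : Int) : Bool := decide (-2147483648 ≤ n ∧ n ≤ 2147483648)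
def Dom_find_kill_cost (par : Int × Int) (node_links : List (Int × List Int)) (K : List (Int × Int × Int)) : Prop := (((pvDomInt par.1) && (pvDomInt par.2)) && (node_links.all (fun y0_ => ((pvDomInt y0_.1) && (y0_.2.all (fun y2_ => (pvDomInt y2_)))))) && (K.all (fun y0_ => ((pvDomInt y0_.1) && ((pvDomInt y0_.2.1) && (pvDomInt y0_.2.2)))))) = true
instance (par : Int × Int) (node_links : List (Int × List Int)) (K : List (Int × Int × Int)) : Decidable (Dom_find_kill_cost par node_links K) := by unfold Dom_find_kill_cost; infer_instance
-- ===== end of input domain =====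

-- B replaces A's memoized recursion by an iterative defunctionalized explicit-stack machine
-- (objective: alternative decomposition, same cost). Both versions mutate the Python dict K
-- identically (same entries, same insertion order); the equivalence proved here is about the
-- RETURN value only.

-- ===== PORT A =====
-- dict lookup keyed by the pair (first match, as a Python dict rendered as an assoc list)
def kGet? : List (Int × Int × Int) → Int × Int → Option Int
  | [], _ => none
  | (a, b, v) :: t, s => if a = s.1 ∧ b = s.2 then some v else kGet? t s

-- dict assignment K[s] = c (overwrite in place, else append; Python dict semantics)
def kSet : List (Int × Int × Int) → Int × Int → Int → List (Int × Int × Int)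
  | [], s, c => [(s.1, s.2, c)]
  | (a, b, v) :: t, s, c =>
    if a = s.1 ∧ b = s.2 then (a, b, c) :: t else (a, b, v) :: kSet t s c

-- node_links[n] (first match; none = KeyError)
def nlGet? : List (Int × List Int) → Int → Option (List Int)
  | [], _ => none
  | (a, ls) :: t, n => if a = n then some ls else nlGet? t n

-- all call states (l, n) the recursion could ever form, plus the root state
def stateUniv (par : Int × Int) (nl : List (Int × List Int)) : List (Int × Int) :=
  (par :: nl.flatMap (fun e => e.2.map (fun l => (l, e.1)))).dedup

-- A's recursion, fueled (the Python recursion has no fuel; on Pre_ the fuel is proved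
-- sufficient, and fuel-out returns none with a top-level 0 fallback, outside Pre_)
mutual
def fkcA (nl : List (Int × List Int)) : Nat → Int × Int → List (Int × Int × Int) →
    Option (Int × List (Int × Int × Int))
  | 0, _, _ => none
  | f + 1, s, K =>
    match kGet? K s with
    | some v => some (v, K)                      -- if par in K: return K[par]
    | none =>
      match nlGet? nl s.1 with
      | none => none                             -- node_links[n]: KeyError
      | some ls =>
        match loopA nl f ls s.1 s.2 1 K with     -- cost = 1; for l in node_links[n]: …
        | none => none
        | some (cost, K1) => some (cost, kSet K1 s cost)   -- K[par] = cost; return cost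
  termination_by f _ _ => (f, 0)

def loopA (nl : List (Int × List Int)) : Nat → List Int → Int → Int → Int →
    List (Int × Int × Int) → Option (Int × List (Int × Int × Int))
  | _, [], _, _, cost, K => some (cost, K)
  | f, l :: ls, n, p, cost, K =>
    if l ≠ p then
      match fkcA nl f (l, n) K with
      | none => none
      | some (c, K1) => loopA nl f ls n p (cost + c) K1
    else loopA nl f ls n p cost K
  termination_by f ls _ _ _ _ => (f, ls.length + 1)
end

def find_kill_cost (par : Int × Int) (node_links : List (Int × List Int)) (K : List (Int × Int × Int)) : Int :=
  match fkcA node_links ((stateUniv par node_links).length + 1) par K with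
  | some (c, _) => c
  | none => 0

-- ===== PORT B =====
inductive BFrame where
  | call : Int → Int → BFrame                    -- ("call", n, p)
  | loop : Int → Int → List Int → Int → BFrame   -- ("loop", n, p, ls, acc)
deriving DecidableEq, Repr

-- fuel bound for the machine (the Python while-loop has no fuel; this bound is proved
-- sufficient wherever A's recursion succeeds)
def maxLen (nl : List (Int × List Int)) : Nat := nl.foldr (fun e m => max e.2.length m) 0

def sbCall (L : Nat) : Nat → Nat
  | 0 => 0
  | f + 1 => 2 + L + L * sbCall L f

-- one iteration of B's while-loop per fuel unit
def runB (nl : List (Int × List Int)) : Nat → List BFrame → List (Int × Int × Int) → Int →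
    Option (List (Int × Int × Int))
  | 0, _, _, _ => none
  | f + 1, stack, K, ret =>
    match stack with
    | [] => some K
    | .call n p :: st =>
      match kGet? K (n, p) with
      | some v => runB nl f st K v               -- ret = K[(n,p)]
      | none =>
        match nlGet? nl n with
        | none => none                           -- node_links[n]: KeyError
        | some ls => runB nl f (.loop n p ls 1 :: st) K 0
    | .loop n p ls acc :: st =>
      let acc2 := acc + ret
      match ls with
      | [] => runB nl f st (kSet K (n, p) acc2) acc2   -- K[(n,p)] = acc; ret = acc
      | l :: rest =>
        if l ≠ p then runB nl f (.call l n :: .loop n p rest acc2 :: st) K 0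
        else runB nl f (.loop n p rest acc2 :: st) K 0

def find_kill_cost_alt (par : Int × Int) (node_links : List (Int × List Int)) (K : List (Int × Int × Int)) : Int :=
  match runB node_links (sbCall (maxLen node_links) ((stateUniv par node_links).length + 1) + 1)
      [.call par.1 par.2] K 0 with
  | some K' => (kGet? K' par).getD 0             -- return K[par]
  | none => 0

-- ===== PRECONDITION & SPEC =====
-- Pre_ holds EXACTLY on the inputs where the Python A returns (excludes only KeyError
-- and infinite recursion / RecursionError): it asserts a rank certificate RankCert for
-- the call-state graph — every call state reachable from par is either already memoized
-- in K or has its node present in node_links, and a leaf-first ranking of those states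
-- exists under which every recursive call strictly increases the rank.  Such a ranking
-- cannot be guessed by a reader, so buildOrder computes the canonical one (reachable
-- states, then repeated sink elimination); RankCert itself is a plain closed-form
-- membership/ordering condition on that list, and the proofs use only RankCert.

-- the key pairs already memoized in K
def memoKeys (K : List (Int × Int × Int)) : List (Int × Int) := K.map (fun e => (e.1, e.2.1))

-- successor call states of a call state (none if it is answered from the memo K)
def succOf (nl : List (Int × List Int)) (K : List (Int × Int × Int)) (s : Int × Int) : List (Int × Int) :=
  if s ∈ memoKeys K then []
  else ((nl.lookup s.1).getD []).filterMap (fun l => if l = s.2 then none else some (l, s.1))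

def closeStep (nl : List (Int × List Int)) (K : List (Int × Int × Int)) (R : List (Int × Int)) : List (Int × Int) :=
  (R ++ R.flatMap (succOf nl K)).dedup

def reachSet (par : Int × Int) (nl : List (Int × List Int)) (K : List (Int × Int × Int)) : List (Int × Int) :=
  (closeStep nl K)^[(stateUniv par nl).length] [par]

def topoGo (nl : List (Int × List Int)) (K : List (Int × Int × Int)) :
    Nat → List (Int × Int) → List (Int × Int) → List (Int × Int)
  | 0, _, acc => acc
  | fuel + 1, pending, acc =>
    match pending.find? (fun s => (succOf nl K s).all (acc.contains ·)) with
    | none => acc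
    | some s => topoGo nl K fuel (pending.erase s) (s :: acc)

def buildOrder (par : Int × Int) (nl : List (Int × List Int)) (K : List (Int × Int × Int)) : List (Int × Int) :=
  let R := reachSet par nl K
  topoGo nl K R.length R []

-- the declarative certificate: L is a duplicate-free leaf-first ranking of call states,
-- containing the root, drawn from the state universe; every ranked state is either
-- memoized in K or its node is present in node_links with every recursive call going
-- to a strictly later-ranked state
def RankCert (nl : List (Int × List Int)) (K : List (Int × Int × Int)) (par : Int × Int)
    (L : List (Int × Int)) : Prop :=
  L.Nodup ∧ par ∈ L ∧ (∀ s ∈ L, s ∈ stateUniv par nl) ∧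
  ∀ s ∈ L, s ∈ memoKeys K ∨
    (nl.lookup s.1 ≠ none ∧ ∀ l ∈ (nl.lookup s.1).getD [], l = s.2 ∨
      ((l, s.1) ∈ L ∧ L.idxOf s < L.idxOf (l, s.1)))

def Pre_find_kill_cost (par : Int × Int) (node_links : List (Int × List Int)) (K : List (Int × Int × Int)) : Prop :=
  RankCert node_links K par (buildOrder par node_links K)
instance (par : Int × Int) (node_links : List (Int × List Int)) (K : List (Int × Int × Int)) : Decidable (Pre_find_kill_cost par node_links K) := by unfold Pre_find_kill_cost; unfold RankCert; infer_instance

def pvWitness_find_kill_cost : (Int × Int) × (List (Int × List Int)) × (List (Int × Int × Int)) :=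
  ((0, -1), ([(0, [1, 2]), (1, [0]), (2, [0])], [((2 : Int), (0 : Int), (5 : Int))]))

def Spec_find_kill_cost (par : Int × Int) (node_links : List (Int × List Int)) (K : List (Int × Int × Int)) (out : Int) : Prop := out = find_kill_cost_alt par node_links K
instance (par : Int × Int) (node_links : List (Int × List Int)) (K : List (Int × Int × Int)) (out : Int) : Decidable (Spec_find_kill_cost par node_links K out) := by unfold Spec_find_kill_cost; infer_instance

-- ===== CLAIM (what is proved, stated in full; the proofs are below) =====
def Claim_equal_find_kill_cost : Prop := ∀ (par : Int × Int) (node_links : List (Int × List Int)) (K : List (Int × Int × Int)), Dom_find_kill_cost par node_links K → Pre_find_kill_cost par node_links K → Spec_find_kill_cost par node_links K (find_kill_cost par node_links K)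

-- ===== LEMMAS AND PROOFS =====
theorem kGet?_kSet_self (K : List (Int × Int × Int)) (s : Int × Int) (c : Int) :
    kGet? (kSet K s c) s = some c := by
  induction K with
  | nil => simp [kSet, kGet?]
  | cons e t ih =>
    obtain ⟨a, b, v⟩ := e
    by_cases h : a = s.1 ∧ b = s.2 <;> simp [kSet, kGet?, h, ih]

theorem nlGet?_mem {nl : List (Int × List Int)} {n : Int} {ls : List Int}
    (h : nlGet? nl n = some ls) : (n, ls) ∈ nl := by
  induction nl with
  | nil => simp [nlGet?] at h
  | cons e t ih =>
    obtain ⟨a, l'⟩ := e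
    by_cases ha : a = n
    · subst ha; simp [nlGet?] at h; subst h; exact List.mem_cons_self
    · simp only [nlGet?, if_neg ha] at h
      exact List.mem_cons_of_mem _ (ih h)

theorem maxLen_bound {nl : List (Int × List Int)} {n : Int} {ls : List Int}
    (h : nlGet? nl n = some ls) : ls.length ≤ maxLen nl := by
  have hm := nlGet?_mem h
  clear h
  induction nl with
  | nil => simp at hm
  | cons e t ih =>
    rcases List.mem_cons.mp hm with h | h
    · subst h; simp [maxLen]
    · refine le_trans (ih h) ?_
      simp [maxLen]

-- bridges between the certificate's stdlib lookups and the ports' dict lookups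
theorem memoKeys_iff (K : List (Int × Int × Int)) (s : Int × Int) :
    s ∈ memoKeys K ↔ (kGet? K s).isSome = true := by
  induction K with
  | nil => simp [memoKeys, kGet?]
  | cons e t ih =>
    obtain ⟨a, b, v⟩ := e
    by_cases h : a = s.1 ∧ b = s.2
    · rw [kGet?, if_pos h]
      simp only [memoKeys, List.map_cons, List.mem_cons, Option.isSome_some, iff_true]
      exact Or.inl (Prod.ext h.1 h.2).symm
    · rw [kGet?, if_neg h]
      simp only [memoKeys, List.map_cons, List.mem_cons] at ih ⊢
      constructor
      · rintro (he | hm)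
        · exact absurd ⟨(congrArg Prod.fst he).symm, (congrArg Prod.snd he).symm⟩ h
        · exact ih.mp hm
      · intro hk; exact Or.inr (ih.mpr hk)

theorem nlGet?_eq_lookup (nl : List (Int × List Int)) (n : Int) :
    nlGet? nl n = nl.lookup n := by
  induction nl with
  | nil => simp [nlGet?]
  | cons e t ih =>
    obtain ⟨a, ls⟩ := e
    by_cases h : a = n
    · simp [nlGet?, List.lookup, h]
    · rw [nlGet?, if_neg h, List.lookup]
      have hb : (n == a) = false := by simp; exact fun hc => absurd hc.symm h
      rw [hb]
      exact ih

-- RankCert unpacked, with its stdlib lookups bridged to the ports' dict lookups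
theorem verify_props {nl : List (Int × List Int)} {K : List (Int × Int × Int)}
    {par : Int × Int} {L : List (Int × Int)} (h : RankCert nl K par L) :
    L.Nodup ∧ par ∈ L ∧ (∀ s ∈ L, s ∈ stateUniv par nl) ∧
    ∀ s ∈ L, (kGet? K s).isSome = true ∨
      ∃ ls, nlGet? nl s.1 = some ls ∧ ∀ l ∈ ls, l = s.2 ∨
        ((l, s.1) ∈ L ∧ L.idxOf s < L.idxOf (l, s.1)) := by
  obtain ⟨h1, h2, h4, h3⟩ := h
  refine ⟨h1, h2, h4, ?_⟩
  intro s hs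
  rcases h3 s hs with hk | ⟨hn, hm⟩
  · exact Or.inl ((memoKeys_iff K s).mp hk)
  · rw [← nlGet?_eq_lookup] at hn hm
    cases hg : nlGet? nl s.1 with
    | none => exact absurd hg hn
    | some ls =>
      rw [hg] at hm
      exact Or.inr ⟨ls, rfl, hm⟩

-- memo keys only grow
theorem kGet?_kSet_isSome (K : List (Int × Int × Int)) (t s : Int × Int) (c : Int)
    (h : (kGet? K t).isSome = true) : (kGet? (kSet K s c) t).isSome = true := by
  induction K with
  | nil => simp [kGet?] at h
  | cons e u ih =>
    obtain ⟨a, b, v⟩ := e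
    by_cases hs : a = s.1 ∧ b = s.2
    · rw [kSet, if_pos hs]
      by_cases ht : a = t.1 ∧ b = t.2
      · simp [kGet?, ht]
      · rw [kGet?, if_neg ht] at h ⊢
        exact h
    · rw [kSet, if_neg hs]
      by_cases ht : a = t.1 ∧ b = t.2
      · simp [kGet?, ht]
      · rw [kGet?, if_neg ht] at h ⊢
        exact ih h

theorem loopA_mono_aux (nl : List (Int × List Int)) (f : Nat)
    (hf : ∀ s K c K', fkcA nl f s K = some (c, K') →
      ∀ t, (kGet? K t).isSome = true → (kGet? K' t).isSome = true) :
    ∀ (ls : List Int) (n p cost : Int) (K : List (Int × Int × Int)) r,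
      loopA nl f ls n p cost K = some r →
      ∀ t, (kGet? K t).isSome = true → (kGet? r.2 t).isSome = true := by
  intro ls
  induction ls with
  | nil =>
    intro n p cost K r h t ht
    rw [loopA] at h
    simp only [Option.some.injEq] at h
    rw [← h]
    exact ht
  | cons l u ih =>
    intro n p cost K r h t ht
    rw [loopA] at h
    by_cases hlp : l = p
    · rw [if_neg (by simp [hlp])] at h
      exact ih n p cost K r h t ht
    · rw [if_pos (by simp [hlp])] at h
      cases hc : fkcA nl f (l, n) K with
      | none => rw [hc] at h; simp at h
      | some r1 =>
        rw [hc] at h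
        obtain ⟨c1, K1⟩ := r1
        exact ih n p (cost + c1) K1 r h t (hf (l, n) K c1 K1 hc t ht)

theorem fkcA_mono (nl : List (Int × List Int)) :
    ∀ (f : Nat) (s : Int × Int) (K : List (Int × Int × Int)) (c : Int) K',
      fkcA nl f s K = some (c, K') →
      ∀ t, (kGet? K t).isSome = true → (kGet? K' t).isSome = true := by
  intro f
  induction f with
  | zero => intro s K c K' h; simp [fkcA] at h
  | succ f ih =>
    intro s K c K' h t ht
    rw [fkcA] at h
    split at h
    · rename_i v hm
      simp only [Option.some.injEq, Prod.mk.injEq] at h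
      rw [← h.2]
      exact ht
    · split at h
      · simp at h
      · split at h
        · simp at h
        · rename_i cost K1 hloop
          simp only [Option.some.injEq, Prod.mk.injEq] at h
          rw [← h.2]
          exact kGet?_kSet_isSome K1 t s cost (loopA_mono_aux nl f ih _ _ _ _ _ _ hloop t ht)

-- termination: the rank certificate makes A's recursion succeed given fuel > rank measure
theorem termCall {nl : List (Int × List Int)} {K : List (Int × Int × Int)}
    {L : List (Int × Int)}
    (hstep : ∀ s ∈ L, (kGet? K s).isSome = true ∨
      ∃ ls, nlGet? nl s.1 = some ls ∧ ∀ l ∈ ls, l = s.2 ∨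
        ((l, s.1) ∈ L ∧ L.idxOf s < L.idxOf (l, s.1))) :
    ∀ (f : Nat) (s : Int × Int) (Krt : List (Int × Int × Int)), s ∈ L →
      L.length - L.idxOf s < f →
      (∀ t, (kGet? K t).isSome = true → (kGet? Krt t).isSome = true) →
      ∃ r, fkcA nl f s Krt = some r := by
  intro f
  induction f with
  | zero =>
    intro s Krt hs hf _
    have := List.idxOf_lt_length_of_mem hs
    omega
  | succ f ih =>
    intro s Krt hs hf hmono
    cases hm : kGet? Krt s with
    | some v => exact ⟨(v, Krt), by rw [fkcA, hm]⟩
    | none =>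
      have hKnone : (kGet? K s).isSome = false := by
        cases hk : (kGet? K s).isSome with
        | false => rfl
        | true => have := hmono s hk; rw [hm] at this; simp at this
      rcases hstep s hs with hk | ⟨ls, hls, hedge⟩
      · rw [hKnone] at hk; simp at hk
      · have hsidx := List.idxOf_lt_length_of_mem hs
        have hloop : ∀ (ls' : List Int), (∀ l ∈ ls', l = s.2 ∨
            ((l, s.1) ∈ L ∧ L.idxOf s < L.idxOf (l, s.1))) →
            ∀ (acc : Int) (K0 : List (Int × Int × Int)),
              (∀ t, (kGet? K t).isSome = true → (kGet? K0 t).isSome = true) →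
              ∃ r, loopA nl f ls' s.1 s.2 acc K0 = some r := by
          intro ls'
          induction ls' with
          | nil => intro _ acc K0 _; exact ⟨(acc, K0), by rw [loopA]⟩
          | cons l u iht =>
            intro hsub acc K0 hm0
            by_cases heq : l = s.2
            · obtain ⟨r, hr⟩ := iht (fun x hx => hsub x (List.mem_cons_of_mem _ hx)) acc K0 hm0
              exact ⟨r, by rw [loopA, if_neg (by simp [heq])]; exact hr⟩
            · rcases hsub l List.mem_cons_self with h | ⟨hmem, hidx⟩
              · exact absurd h heq
              · have hlt : L.length - L.idxOf (l, s.1) < f := by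
                  have := List.idxOf_lt_length_of_mem hmem
                  omega
                obtain ⟨⟨c, K1⟩, hc⟩ := ih (l, s.1) K0 hmem hlt hm0
                have hm1 : ∀ t, (kGet? K t).isSome = true → (kGet? K1 t).isSome = true :=
                  fun t ht => fkcA_mono nl f (l, s.1) K0 c K1 hc t (hm0 t ht)
                obtain ⟨r, hr⟩ := iht (fun x hx => hsub x (List.mem_cons_of_mem _ hx)) (acc + c) K1 hm1
                exact ⟨r, by rw [loopA, if_pos (by simp [heq]), hc]; exact hr⟩
        obtain ⟨⟨cost, K1⟩, hcl⟩ := hloop ls hedge 1 Krt hmono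
        exact ⟨(cost, kSet K1 s cost), by rw [fkcA]; simp [hm, hls, hcl]⟩

-- A's result is recorded in the final memo table
theorem fkcA_kGet {nl : List (Int × List Int)} {f : Nat} {s : Int × Int}
    {K K' : List (Int × Int × Int)} {c : Int}
    (h : fkcA nl f s K = some (c, K')) : kGet? K' s = some c := by
  cases f with
  | zero => simp [fkcA] at h
  | succ f =>
    rw [fkcA] at h
    split at h
    · rename_i v hm
      simp only [Option.some.injEq, Prod.mk.injEq] at h
      obtain ⟨hv, hK⟩ := h
      subst hv; subst hK; exact hm
    · split at h
      · simp at h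
      · split at h
        · simp at h
        · rename_i cost K1 hlp
          simp only [Option.some.injEq, Prod.mk.injEq] at h
          obtain ⟨hc, hK⟩ := h
          subst hK
          rw [← hc]
          exact kGet?_kSet_self K1 s cost

-- arithmetic helpers for the fuel bounds
theorem sb_one_le (L f : Nat) : 1 ≤ sbCall L (f + 1) := by
  rw [sbCall]
  exact le_trans (by norm_num) ((Nat.le_add_right 2 L).trans (Nat.le_add_right (2 + L) _))

theorem sb_step (S T m2 : Nat) (h : m2 ≤ T * (1 + S) + 1) :
    1 + m2 ≤ (T + 1) * (1 + S) + 1 := by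
  have e : (T + 1) * (1 + S) = T * (1 + S) + 1 + S := by ring
  rw [e]
  generalize hP : T * (1 + S) = P
  rw [hP] at h
  omega

theorem sb_step2 (S T m1 m2 : Nat) (h1 : m1 ≤ S) (h2 : m2 ≤ T * (1 + S) + 1) :
    1 + m1 + m2 ≤ (T + 1) * (1 + S) + 1 := by
  have e : (T + 1) * (1 + S) = T * (1 + S) + 1 + S := by ring
  rw [e]
  generalize hP : T * (1 + S) = P
  rw [hP] at h2
  omega

theorem sb_top (L S T mL : Nat) (hT : T ≤ L) (h : mL ≤ T * (1 + S) + 1) :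
    1 + mL ≤ 2 + L + L * S := by
  have h2 : T * (1 + S) ≤ L * (1 + S) := Nat.mul_le_mul_right _ hT
  have e : L * (1 + S) = L + L * S := by ring
  rw [e] at h2
  generalize hP : T * (1 + S) = P
  rw [hP] at h h2
  generalize hQ : L * S = Q
  rw [hQ] at h2
  omega

-- simulation: the machine executes the recursion step for step
theorem simCall {nl : List (Int × List Int)} :
    ∀ (f : Nat) (s : Int × Int) (K : List (Int × Int × Int)) (c : Int) (K' : List (Int × Int × Int)),
      fkcA nl f s K = some (c, K') →
      ∀ (st : List BFrame) (r : Int), ∃ m ≤ sbCall (maxLen nl) f,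
        ∀ g, runB nl (m + g) (.call s.1 s.2 :: st) K r = runB nl g st K' c := by
  intro f
  induction f with
  | zero => intro s K c K' h; simp [fkcA] at h
  | succ f ih =>
    intro s K c K' h st r
    obtain ⟨n, p⟩ := s
    rw [fkcA] at h
    split at h
    · -- memo hit: one machine step
      rename_i v hm
      simp only [Option.some.injEq, Prod.mk.injEq] at h
      obtain ⟨hv, hK⟩ := h
      subst hv; subst hK
      refine ⟨1, sb_one_le _ _, ?_⟩
      intro g
      rw [Nat.add_comm 1 g, runB]
      simp [hm]
    · rename_i hm
      split at h
      · simp at h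
      · rename_i ls hls
        split at h
        · simp at h
        · rename_i cost K1 hloopEq
          simp only [Option.some.injEq, Prod.mk.injEq] at h
          obtain ⟨hc, hK⟩ := h
          -- the loop-frame simulation
          have simLoopH : ∀ (ls₀ : List Int) (acc : Int) (K₀ : List (Int × Int × Int))
              (cost₀ : Int) (K₁ : List (Int × Int × Int)),
              loopA nl f ls₀ n p acc K₀ = some (cost₀, K₁) →
              ∀ (st₀ : List BFrame) (aF r₀ : Int), aF + r₀ = acc →
              ∃ m ≤ ls₀.length * (1 + sbCall (maxLen nl) f) + 1,
                ∀ g, runB nl (m + g) (.loop n p ls₀ aF :: st₀) K₀ r₀ =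
                  runB nl g st₀ (kSet K₁ (n, p) cost₀) cost₀ := by
            intro ls₀
            induction ls₀ with
            | nil =>
              intro acc K₀ cost₀ K₁ hL st₀ aF r₀ hsum
              rw [loopA] at hL
              simp only [Option.some.injEq, Prod.mk.injEq] at hL
              obtain ⟨hc₀, hK₀⟩ := hL
              subst hc₀; subst hK₀
              refine ⟨1, by simp, ?_⟩
              intro g
              rw [Nat.add_comm 1 g, runB]
              simp [hsum]
            | cons l t ihL =>
              intro acc K₀ cost₀ K₁ hL st₀ aF r₀ hsum
              rw [loopA] at hL
              by_cases hlp' : l = p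
              · rw [if_neg (by simp [hlp'])] at hL
                obtain ⟨m2, hm2, hrun2⟩ := ihL acc K₀ cost₀ K₁ hL st₀ acc 0 (by ring)
                refine ⟨1 + m2, by simpa using sb_step _ _ _ hm2, ?_⟩
                intro g
                have e : 1 + m2 + g = (m2 + g) + 1 := by omega
                rw [e, runB]
                subst hlp'
                simp only [ne_eq, not_true_eq_false, if_false, hsum]
                exact hrun2 g
              · rw [if_pos hlp'] at hL
                split at hL
                · simp at hL
                · rename_i c1 K1' heq
                  obtain ⟨m1, hm1, hrun1⟩ := ih (l, n) K₀ c1 K1' heq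
                    (.loop n p t acc :: st₀) 0
                  obtain ⟨m2, hm2, hrun2⟩ := ihL (acc + c1) K1' cost₀ K₁ hL st₀ acc c1 rfl
                  refine ⟨1 + m1 + m2, by simpa using sb_step2 _ _ _ _ hm1 hm2, ?_⟩
                  intro g
                  have e : 1 + m1 + m2 + g = (m1 + (m2 + g)) + 1 := by omega
                  rw [e, runB]
                  simp only [ne_eq, hlp', not_false_eq_true, if_true, hsum]
                  rw [hrun1 (m2 + g)]
                  exact hrun2 g
          obtain ⟨mL, hmL, hrunL⟩ := simLoopH ls 1 K cost K1 hloopEq st 1 0 (by ring)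
          refine ⟨1 + mL, ?_, ?_⟩
          · rw [sbCall]
            exact sb_top _ _ _ _ (maxLen_bound hls) hmL
          · intro g
            have e : 1 + mL + g = (mL + g) + 1 := by omega
            rw [e, runB]
            simp only [hm, hls]
            rw [hrunL g, ← hc, ← hK]

-- the certificate list fits inside the state universe, bounding the rank measure
theorem fkcA_total {nl : List (Int × List Int)} {par : Int × Int} {K : List (Int × Int × Int)}
    (hPre : Pre_find_kill_cost par nl K) :
    ∃ c K', fkcA nl ((stateUniv par nl).length + 1) par K = some (c, K') := by
  obtain ⟨hNd, hpar, hsub, hstep⟩ := verify_props hPre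
  have hlen : (buildOrder par nl K).length ≤ (stateUniv par nl).length :=
    (hNd.subperm (fun x hx => hsub x hx)).length_le
  have hmu : (buildOrder par nl K).length - (buildOrder par nl K).idxOf par <
      (stateUniv par nl).length + 1 := by omega
  obtain ⟨⟨c, K'⟩, hr⟩ := termCall hstep ((stateUniv par nl).length + 1) par K hpar hmu
    (fun t ht => ht)
  exact ⟨c, K', hr⟩

-- ===== VERDICT (by name: the statement is the Claim_ definition above) =====
theorem find_kill_cost_spec : Claim_equal_find_kill_cost := by
  intro par nl K _hDom hPre
  unfold Spec_find_kill_cost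
  obtain ⟨c, K', hA⟩ := fkcA_total hPre
  have hL : find_kill_cost par nl K = c := by
    unfold find_kill_cost
    rw [hA]
  obtain ⟨m, hm, hrun⟩ := simCall ((stateUniv par nl).length + 1) par K c K' hA [] 0
  have hfuel : sbCall (maxLen nl) ((stateUniv par nl).length + 1) + 1 =
      m + (sbCall (maxLen nl) ((stateUniv par nl).length + 1) + 1 - m) := by omega
  have hrem : ∃ j, sbCall (maxLen nl) ((stateUniv par nl).length + 1) + 1 - m = j + 1 :=
    ⟨sbCall (maxLen nl) ((stateUniv par nl).length + 1) - m, by omega⟩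
  obtain ⟨j, hj⟩ := hrem
  have hR : find_kill_cost_alt par nl K = c := by
    unfold find_kill_cost_alt
    rw [hfuel, hrun, hj, runB]
    simp [fkcA_kGet hA]
  rw [hL, hR]
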